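-- pv_equiv track=rewrite | github.com/Luolingwei/LeetCode | Graph/Q1601_Maximum Number of Achievable Transfer Requests.py | maximumRequests1
-- ===== SOURCE A (Python) =====
-- import itertools
--
-- def maximumRequests1(n: int, requests):
--     for k in range(len(requests),0,-1):
--         for comb in itertools.combinations(range(len(requests)),k):
--             degree = [0]*n
--             for ridx in comb:
--                 degree[requests[ridx][0]]-=1
--                 degree[requests[ridx][1]]+=1
--             if not any(degree):
--                 return k
--     return 0
-- ===== SOURCE B (Python) =====
-- def maximumRequests1(n: int, requests):
--     degree = [0] * n
--     m = len(requests)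
--
--     def dfs(i, cnt):
--         if i == m:
--             return cnt if not any(degree) else 0
--         best = dfs(i + 1, cnt)          # exclude request i
--         fr, to = requests[i][0], requests[i][1]
--         degree[fr] -= 1
--         degree[to] += 1
--         best = max(best, dfs(i + 1, cnt + 1))  # include request i
--         degree[fr] += 1
--         degree[to] -= 1
--         return best
--
--     return dfs(0, 0)
-- ===== Notes on version B (the rewrite author's own statement) =====
-- stated objective: alternative
-- what changed: Replaced A's descending-size enumeration of all index combinations (rebuilding the degree array from scratch for each combination) with a single recursive include/exclude DFS over the requests that maintains the degree list incrementally and takes the max of balanced subset sizes.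
import Mathlib
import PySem

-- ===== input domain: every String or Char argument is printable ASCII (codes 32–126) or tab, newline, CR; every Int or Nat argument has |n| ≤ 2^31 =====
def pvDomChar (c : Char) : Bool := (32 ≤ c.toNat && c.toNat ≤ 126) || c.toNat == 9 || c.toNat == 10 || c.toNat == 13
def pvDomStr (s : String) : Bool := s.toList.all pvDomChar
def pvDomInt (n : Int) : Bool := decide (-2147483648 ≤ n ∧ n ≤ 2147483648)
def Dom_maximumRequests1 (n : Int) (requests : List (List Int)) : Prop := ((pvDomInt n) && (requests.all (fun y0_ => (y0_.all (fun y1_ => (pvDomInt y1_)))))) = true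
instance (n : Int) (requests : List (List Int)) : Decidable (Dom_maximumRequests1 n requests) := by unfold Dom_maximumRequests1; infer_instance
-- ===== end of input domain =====

-- B replaces A's per-size combination enumeration with include/exclude DFS that maintains the degree list incrementally (alternative decomposition; return value only — B's Python mutates only its own local list).


-- ===== PORT A =====
-- degree[i] += v with Python's negative-index wraparound (total form; Pre_ keeps the index in range)
def bumpDeg (deg : List Int) (i : Int) (v : Int) : List Int :=
  PySem.List.pySetD deg i (PySem.List.pyGetD deg i 0 + v)

-- itertools.combinations(l, k): all k-element subsequences, in order
def combs {α : Type} : Nat → List α → List (List α)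
  | 0, _ => [[]]
  | _ + 1, [] => []
  | k + 1, x :: xs => ((combs k xs).map (fun c => x :: c)) ++ combs (k + 1) xs

-- degree after applying the requests picked by the index tuple `comb`
def degOf (n : Int) (requests : List (List Int)) (comb : List Int) : List Int :=
  comb.foldl
    (fun deg ridx =>
      let r := PySem.List.pyGetD requests ridx []
      bumpDeg (bumpDeg deg (PySem.List.pyGetD r 0 0) (-1)) (PySem.List.pyGetD r 1 0) 1)
    (List.replicate n.toNat 0)

-- the outer `for k in range(len(requests), 0, -1)` with its early return
def findK (n : Int) (requests : List (List Int)) : List Int → Int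
  | [] => 0
  | k :: ks =>
    if (combs k.toNat (PySem.List.pyRange 0 requests.length 1)).any
        (fun c => (degOf n requests c).all (fun x => x == 0)) then
      k
    else findK n requests ks

def maximumRequests1 (n : Int) (requests : List (List Int)) : Int :=
  findK n requests (PySem.List.pyRange requests.length 0 (-1))

-- ===== PORT B =====
-- include/exclude DFS over the remaining requests; `deg` is B's mutable degree list
def dfsB (deg : List Int) : List (List Int) → Int → Int
  | [], cnt => if deg.all (fun x => x == 0) then cnt else 0
  | r :: rs, cnt =>
    max (dfsB deg rs cnt)
        (dfsB (bumpDeg (bumpDeg deg (PySem.List.pyGetD r 0 0) (-1)) (PySem.List.pyGetD r 1 0) 1)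
              rs (cnt + 1))

def maximumRequests1_alt (n : Int) (requests : List (List Int)) : Int :=
  dfsB (List.replicate n.toNat 0) requests 0

-- ===== PRECONDITION & SPEC =====
-- Pre_ excludes exactly the inputs where A raises IndexError: a request with fewer
-- than two entries, or a from/to index outside Python's valid range [-n, n).
def Pre_maximumRequests1 (n : Int) (requests : List (List Int)) : Prop :=
  ∀ r ∈ requests, 2 ≤ r.length ∧
    (-n ≤ PySem.List.pyGetD r 0 0 ∧ PySem.List.pyGetD r 0 0 < n) ∧
    (-n ≤ PySem.List.pyGetD r 1 0 ∧ PySem.List.pyGetD r 1 0 < n)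
instance (n : Int) (requests : List (List Int)) : Decidable (Pre_maximumRequests1 n requests) := by
  unfold Pre_maximumRequests1; infer_instance

def pvWitness_maximumRequests1 : Int × List (List Int) := (2, [[0, 1], [1, 0]])

def Spec_maximumRequests1 (n : Int) (requests : List (List Int)) (out : Int) : Prop := out = maximumRequests1_alt n requests
instance (n : Int) (requests : List (List Int)) (out : Int) : Decidable (Spec_maximumRequests1 n requests out) := by unfold Spec_maximumRequests1; infer_instance

-- ===== CLAIM (what is proved, stated in full; the proofs are below) =====
def Claim_equal_maximumRequests1 : Prop := ∀ (n : Int) (requests : List (List Int)), Dom_maximumRequests1 n requests → Pre_maximumRequests1 n requests → Spec_maximumRequests1 n requests (maximumRequests1 n requests)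

-- ===== LEMMAS AND PROOFS =====

-- a helper used only in the proofs: the degree update one request causes (same update both ports make)
def applyR (deg : List Int) (r : List Int) : List Int :=
  bumpDeg (bumpDeg deg (PySem.List.pyGetD r 0 0) (-1)) (PySem.List.pyGetD r 1 0) 1

-- the value B's DFS assigns to one chosen subset t
def score (deg : List Int) (cnt : Int) (t : List (List Int)) : Int :=
  if (t.foldl applyR deg).all (fun x => x == 0) then cnt + t.length else 0

theorem dfsB_cons (deg : List Int) (r : List Int) (rs : List (List Int)) (cnt : Int) :
    dfsB deg (r :: rs) cnt = max (dfsB deg rs cnt) (dfsB (applyR deg r) rs (cnt + 1)) := rfl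

theorem score_nil (deg : List Int) (cnt : Int) :
    score deg cnt [] = dfsB deg [] cnt := by
  simp [score, dfsB]

theorem score_cons (deg : List Int) (r : List Int) (cnt : Int) (t : List (List Int)) :
    score (applyR deg r) (cnt + 1) t = score deg cnt (r :: t) := by
  simp only [score, List.foldl_cons, List.length_cons]
  split_ifs with h
  · push_cast; ring
  · rfl

theorem dfsB_attains : ∀ (rs : List (List Int)) (deg : List Int) (cnt : Int),
    ∃ t, t.Sublist rs ∧ dfsB deg rs cnt = score deg cnt t := by
  intro rs
  induction rs with
  | nil => intro deg cnt; exact ⟨[], List.Sublist.refl _, (score_nil deg cnt).symm⟩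
  | cons r rs ih =>
    intro deg cnt
    obtain ⟨t1, hs1, he1⟩ := ih deg cnt
    obtain ⟨t2, hs2, he2⟩ := ih (applyR deg r) (cnt + 1)
    rcases le_total (dfsB deg rs cnt) (dfsB (applyR deg r) rs (cnt + 1)) with h | h
    · refine ⟨r :: t2, List.Sublist.cons₂ _ hs2, ?_⟩
      rw [dfsB_cons, max_eq_right h, he2, score_cons]
    · refine ⟨t1, hs1.cons _, ?_⟩
      rw [dfsB_cons, max_eq_left h, he1]

theorem score_le_dfsB : ∀ (rs t : List (List Int)) (deg : List Int) (cnt : Int),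
    t.Sublist rs → score deg cnt t ≤ dfsB deg rs cnt := by
  intro rs
  induction rs with
  | nil => intro t deg cnt h; rw [List.sublist_nil.mp h, score_nil]
  | cons r rs ih =>
    intro t deg cnt h
    rw [dfsB_cons]
    rcases List.sublist_cons_iff.mp h with h' | ⟨t', rfl, h'⟩
    · exact le_trans (ih t deg cnt h') (le_max_left _ _)
    · exact le_trans (le_of_eq (score_cons deg r cnt t').symm)
        (le_trans (ih t' (applyR deg r) (cnt + 1) h') (le_max_right _ _))

theorem combs_map {a b : Type} (f : a -> b) :
    ∀ (l : List a) (k : Nat), combs k (l.map f) = (combs k l).map (List.map f) := by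
  intro l
  induction l with
  | nil => intro k; cases k <;> simp [combs]
  | cons x xs ih =>
    intro k
    cases k with
    | zero => simp [combs]
    | succ k =>
      simp only [List.map_cons, combs, ih, List.map_append, List.map_map]
      rfl

theorem mem_combs {a : Type} :
    ∀ (l : List a) (k : Nat) (t : List a), t ∈ combs k l ↔ t.Sublist l ∧ t.length = k := by
  intro l
  induction l with
  | nil =>
    intro k t
    cases k with
    | zero =>
      simp only [combs, List.mem_singleton]
      constructor
      · rintro rfl; exact ⟨List.Sublist.refl _, rfl⟩
      · rintro ⟨h, _⟩; exact List.sublist_nil.mp h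
    | succ k =>
      simp only [combs, List.not_mem_nil, false_iff, not_and]
      intro h
      rw [List.sublist_nil.mp h]
      simp
  | cons x xs ih =>
    intro k t
    cases k with
    | zero =>
      simp only [combs, List.mem_singleton]
      constructor
      · rintro rfl; exact ⟨List.nil_sublist _, rfl⟩
      · rintro ⟨_, h⟩; exact List.length_eq_zero_iff.mp h
    | succ k =>
      simp only [combs, List.mem_append, List.mem_map]
      constructor
      · rintro (⟨c, hc, rfl⟩ | h)
        · obtain ⟨hs, hl⟩ := (ih k c).mp hc
          exact ⟨List.Sublist.cons₂ _ hs, by simp [hl]⟩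
        · obtain ⟨hs, hl⟩ := (ih (k + 1) t).mp h
          exact ⟨hs.cons _, hl⟩
      · rintro ⟨hs, hl⟩
        rcases List.sublist_cons_iff.mp hs with h' | ⟨t', rfl, h'⟩
        · exact Or.inr ((ih (k + 1) t).mpr ⟨h', hl⟩)
        · exact Or.inl ⟨t', (ih k t').mpr ⟨h', by simpa using hl⟩, rfl⟩

theorem degOf_eq (n : Int) (requests : List (List Int)) (c : List Int) :
    degOf n requests c =
      (c.map (fun i => PySem.List.pyGetD requests i [])).foldl applyR (List.replicate n.toNat 0) := by
  simp [degOf, List.foldl_map, applyR]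

theorem anyBal_iff (n : Int) (requests : List (List Int)) (k : Nat) :
    ((combs k (PySem.List.pyRange 0 (requests.length : Int) 1)).any
        (fun c => (degOf n requests c).all (fun x => x == 0)) = true)
      ↔ ∃ t : List (List Int), t.Sublist requests ∧ t.length = k ∧
          ((t.foldl applyR (List.replicate n.toNat 0)).all (fun x => x == 0) = true) := by
  have hmap : (PySem.List.pyRange 0 (requests.length : Int) 1).map
      (fun i => PySem.List.pyGetD requests i []) = requests :=
    PySem.List.map_pyGetD_pyRange_zero requests []
  have hcm := combs_map (fun i => PySem.List.pyGetD requests i [])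
      (PySem.List.pyRange 0 (requests.length : Int) 1) k
  rw [hmap] at hcm
  rw [List.any_eq_true]
  constructor
  · rintro ⟨c, hc, hp⟩
    have hmem : (c.map (fun i => PySem.List.pyGetD requests i [])) ∈ combs k requests := by
      rw [hcm]
      exact List.mem_map_of_mem hc
    obtain ⟨hs, hl⟩ := (mem_combs requests k _).mp hmem
    refine ⟨_, hs, hl, ?_⟩
    rw [← degOf_eq]
    exact hp
  · rintro ⟨t, hs, hl, hb⟩
    have hmem : t ∈ combs k requests := (mem_combs requests k t).mpr ⟨hs, hl⟩
    rw [hcm, List.mem_map] at hmem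
    obtain ⟨c, hc, rfl⟩ := hmem
    exact ⟨c, hc, by rw [degOf_eq]; exact hb⟩

theorem findK_eq (n : Int) (requests : List (List Int)) (M : Int)
    (hub : ∀ t : List (List Int), t.Sublist requests →
      ((t.foldl applyR (List.replicate n.toNat 0)).all (fun x => x == 0) = true) → (t.length : Int) ≤ M)
    (hex : ∃ t : List (List Int), t.Sublist requests ∧
      ((t.foldl applyR (List.replicate n.toNat 0)).all (fun x => x == 0) = true) ∧ (t.length : Int) = M) :
    ∀ j : Nat, M ≤ (j : Int) → findK n requests (PySem.List.pyRange (j : Int) 0 (-1)) = M := by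
  have hM0 : 0 ≤ M := by
    obtain ⟨t, _, _, hl⟩ := hex
    omega
  intro j
  induction j with
  | zero =>
    intro hj
    simp only [Nat.cast_zero]
    rw [PySem.List.pyRange_neg_one_eq_nil le_rfl]
    simp only [findK]
    omega
  | succ j ih =>
    intro hj
    have hcons : PySem.List.pyRange ((j + 1 : Nat) : Int) 0 (-1)
        = ((j + 1 : Nat) : Int) :: PySem.List.pyRange (((j + 1 : Nat) : Int) - 1) 0 (-1) :=
      PySem.List.pyRange_neg_one_cons (by push_cast; omega)
    rw [hcons]
    simp only [findK]
    have htn : (((j + 1 : Nat) : Int)).toNat = j + 1 := by omega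
    by_cases hMe : M = ((j + 1 : Nat) : Int)
    · rw [if_pos]
      · exact hMe.symm
      · rw [htn, anyBal_iff]
        obtain ⟨t, hs, hb, hl⟩ := hex
        exact ⟨t, hs, by omega, hb⟩
    · rw [if_neg]
      · have : (((j + 1 : Nat) : Int) - 1) = (j : Nat) := by push_cast; ring
        rw [this]
        exact ih (by omega)
      · rw [htn, anyBal_iff]
        rintro ⟨t, hs, hl, hb⟩
        have := hub t hs hb
        omega


-- ===== VERDICT (by name: the statement is the Claim_ definition above) =====
theorem maximumRequests1_spec : Claim_equal_maximumRequests1 := by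
  intro n requests _ _
  unfold Spec_maximumRequests1 maximumRequests1 maximumRequests1_alt
  set M := dfsB (List.replicate n.toNat 0) requests 0 with hM
  have hub : ∀ t : List (List Int), t.Sublist requests →
      ((t.foldl applyR (List.replicate n.toNat 0)).all (fun x => x == 0) = true) → (t.length : Int) ≤ M := by
    intro t hs hb
    have := score_le_dfsB requests t (List.replicate n.toNat 0) 0 hs
    rw [score, if_pos hb] at this
    omega
  have hex : ∃ t : List (List Int), t.Sublist requests ∧
      ((t.foldl applyR (List.replicate n.toNat 0)).all (fun x => x == 0) = true) ∧ (t.length : Int) = M := by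
    obtain ⟨t, hs, he⟩ := dfsB_attains requests (List.replicate n.toNat 0) 0
    rw [score] at he
    by_cases hb : ((t.foldl applyR (List.replicate n.toNat 0)).all (fun x => x == 0) = true)
    · rw [if_pos hb] at he
      exact ⟨t, hs, hb, by omega⟩
    · rw [if_neg hb] at he
      refine ⟨[], List.nil_sublist _, ?_, by simp; omega⟩
      simp
  have hMm : M ≤ (requests.length : Int) := by
    obtain ⟨t, hs, _, hl⟩ := hex
    have := hs.length_le
    omega
  exact findK_eq n requests M hub hex requests.length hMm
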